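-- pv_equiv track=rewrite | github.com/faiz03-glicth/FineT_DistilBert_Proj | src/prepare_data.py | check_if_spiked
-- ===== SOURCE A (Python) =====
-- def check_if_spiked(ingredient_string):
--     if not isinstance(ingredient_string, str):
--         return 0 # Skip empty rows
--
--     # Convert to lowercase for easy searching
--     ingredients = ingredient_string.lower()
--
--     suspicious_aminos = ['l-glycine', 'glycine', 'taurine', 'l-taurine', 'creatine', 'Arginine', 'l-arginine', 'beta-alanine', 'l-beta-alanine', 'beta alanine',
--                          'l-beta alanine', 'beta-alanine', 'l-beta-alanine', 'beta alanine', 'l-beta alanine', 'l-citrulline', 'citrulline', 'l-citrulline malate',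
--                          'citrulline malate','Glutamine', 'l-glutamine', 'glutamine', 'l-glutamine', 'glutamine', 'l-glutamine', 'glutamine','Leucine', 'l-leucine',
--                          'leucine', 'l-leucine', 'leucine', 'l-leucine', 'leucine','Isoleucine', 'l-isoleucine', 'isoleucine', 'l-isoleucine', 'isoleucine',
--                          'l-isoleucine', 'isoleucine','Valine', 'l-valine', 'valine', 'l-valine', 'valine', 'l-valine', 'valine']
--
--     for amino in suspicious_aminos:
--         if amino in ingredients:
--             return 1 # 1 = Spiked!
--
--     return 0 # 0 = Authentic/Clean
-- ===== SOURCE B (Python) =====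
-- # Scan the lowercased string once, position by position; the 46-entry list of A
-- # collapses to 10 core substrings (every lowercase entry contains one of these,
-- # and the capitalized entries can never occur in a lowercased string).
-- CORE = ('glycine', 'taurine', 'creatine', 'l-arginine', 'beta-alanine',
--         'beta alanine', 'citrulline', 'glutamine', 'leucine', 'valine')
--
-- def check_if_spiked(ingredient_string):
--     if not isinstance(ingredient_string, str):
--         return 0
--     s = ingredient_string.lower()
--     while s:
--         if s.startswith(CORE):
--             return 1
--         s = s[1:]
--     return 0
-- ===== Notes on version B (the rewrite author's own statement) =====
-- stated objective: simpler
-- what changed: A runs a separate substring scan for each of 46 (heavily duplicated, partly never-matchable capitalized) patterns; B deduplicates them to 10 core substrings and makes a single position-by-position pass over the lowercased string, testing whether any core pattern starts at the current position.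
import Mathlib
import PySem

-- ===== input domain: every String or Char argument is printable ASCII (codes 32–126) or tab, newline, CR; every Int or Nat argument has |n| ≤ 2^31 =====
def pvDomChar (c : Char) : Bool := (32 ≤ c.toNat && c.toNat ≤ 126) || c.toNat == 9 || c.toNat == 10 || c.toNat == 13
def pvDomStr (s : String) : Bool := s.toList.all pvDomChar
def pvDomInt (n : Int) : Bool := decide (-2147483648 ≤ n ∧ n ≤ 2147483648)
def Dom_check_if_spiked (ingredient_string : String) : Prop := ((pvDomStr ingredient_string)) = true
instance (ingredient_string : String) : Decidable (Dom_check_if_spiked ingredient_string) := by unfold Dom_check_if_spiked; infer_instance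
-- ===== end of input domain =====

-- B replaces A's 46 repeated substring scans with one position-by-position scan over the
-- lowercased string against 10 deduplicated core patterns (objective: alternative/simpler).

-- ===== PORT A =====
-- A's literal 46-entry list (duplicates and capitalized entries kept).
def suspiciousAminos : List String :=
  ["l-glycine", "glycine", "taurine", "l-taurine", "creatine", "Arginine", "l-arginine",
   "beta-alanine", "l-beta-alanine", "beta alanine", "l-beta alanine", "beta-alanine",
   "l-beta-alanine", "beta alanine", "l-beta alanine", "l-citrulline", "citrulline",
   "l-citrulline malate", "citrulline malate", "Glutamine", "l-glutamine", "glutamine",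
   "l-glutamine", "glutamine", "l-glutamine", "glutamine", "Leucine", "l-leucine",
   "leucine", "l-leucine", "leucine", "l-leucine", "leucine", "Isoleucine", "l-isoleucine",
   "isoleucine", "l-isoleucine", "isoleucine", "l-isoleucine", "isoleucine", "Valine",
   "l-valine", "valine", "l-valine", "valine", "l-valine", "valine"]

-- the 'for amino in suspicious_aminos: if amino in ingredients: return 1' loop
def spikeLoop : List String → String → Int
  | [], _ => 0
  | amino :: rest, ingredients =>
      if PySem.Str.isIn amino ingredients then 1 else spikeLoop rest ingredients

-- (the 'isinstance' guard is dead here: the argument is always a str)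
def check_if_spiked (ingredient_string : String) : Int :=
  let ingredients := PySem.Str.lower ingredient_string
  spikeLoop suspiciousAminos ingredients

-- ===== PORT B =====
def coreAminos : List String :=
  ["glycine", "taurine", "creatine", "l-arginine", "beta-alanine",
   "beta alanine", "citrulline", "glutamine", "leucine", "valine"]

-- the 'while s: if s.startswith(CORE): return 1; s = s[1:]' scan
def spikeScan : List Char → Int
  | [] => 0
  | c :: t =>
      if coreAminos.any (fun p => PySem.Chars.startswith (c :: t) p.toList) then 1
      else spikeScan t

def check_if_spiked_alt (ingredient_string : String) : Int :=
  spikeScan (PySem.Chars.lower ingredient_string.toList)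

-- ===== PRECONDITION & SPEC =====
def Spec_check_if_spiked (ingredient_string : String) (out : Int) : Prop := out = check_if_spiked_alt ingredient_string
instance (ingredient_string : String) (out : Int) : Decidable (Spec_check_if_spiked ingredient_string out) := by unfold Spec_check_if_spiked; infer_instance

-- ===== CLAIM (what is proved, stated in full; the proofs are below) =====
def Claim_equal_check_if_spiked : Prop := ∀ (ingredient_string : String), Dom_check_if_spiked ingredient_string → Spec_check_if_spiked ingredient_string (check_if_spiked ingredient_string)

-- ===== LEMMAS AND PROOFS =====

-- an uppercase ASCII letter never occurs in a lowercased string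
theorem upper_not_mem_lower (c : Char) (hc : PySem.Chars.isupper c = true)
    (l : List Char) : c ∉ PySem.Chars.lower l := by
  simp only [PySem.Chars.lower, List.mem_map, not_exists]
  rintro d ⟨hd, rfl⟩
  unfold PySem.Chars.lowerChar at hc
  split at hc
  · next h =>
    unfold PySem.Chars.isupper at h hc
    simp only [Bool.and_eq_true, decide_eq_true_eq] at h hc
    have h1 : 65 ≤ d.toNat := Fin.mk_le_mk.mp h.1
    have h2 : d.toNat ≤ 90 := Fin.mk_le_mk.mp h.2
    have hv : (d.toNat + 32).isValidChar := Or.inl (by omega)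
    have ht : (Char.ofNat (d.toNat + 32)).toNat = d.toNat + 32 := by
      rw [Char.ofNat, dif_pos hv]; rfl
    have h3 : (Char.ofNat (d.toNat + 32)).toNat ≤ 90 := Fin.mk_le_mk.mp hc.2
    rw [ht] at h3
    omega
  · next h => exact h hc

-- A's loop returns 1 iff some listed amino is an infix
theorem spikeLoop_eq (l : List String) (ing : String) :
    spikeLoop l ing = if ∃ a ∈ l, a.toList <:+: ing.toList then 1 else 0 := by
  induction l with
  | nil => simp [spikeLoop]
  | cons a rest ih =>
      simp only [spikeLoop, ih]
      by_cases h : PySem.Str.isIn a ing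
      · rw [if_pos h, if_pos]
        exact ⟨a, List.mem_cons_self, (PySem.Str.isIn_iff_infix a ing).mp h⟩
      · rw [if_neg h]
        have hna : ¬ a.toList <:+: ing.toList := fun hi => h ((PySem.Str.isIn_iff_infix a ing).mpr hi)
        by_cases h2 : ∃ b ∈ rest, b.toList <:+: ing.toList
        · rw [if_pos h2, if_pos]
          obtain ⟨b, hb, hbi⟩ := h2
          exact ⟨b, List.mem_cons_of_mem _ hb, hbi⟩
        · rw [if_neg h2, if_neg]
          rintro ⟨b, hb, hbi⟩
          rcases List.mem_cons.mp hb with rfl | hb'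
          · exact hna hbi
          · exact h2 ⟨b, hb', hbi⟩

-- B's scan returns 1 iff some core pattern is an infix
theorem spikeScan_eq (cs : List Char) :
    spikeScan cs = if ∃ p ∈ coreAminos, p.toList <:+: cs then 1 else 0 := by
  induction cs with
  | nil =>
      rw [spikeScan, if_neg]
      rintro ⟨p, hp, hi⟩
      have := List.infix_nil.mp hi
      fin_cases hp <;> simp_all
  | cons c t ih =>
      simp only [spikeScan, ih]
      by_cases h : coreAminos.any (fun p => PySem.Chars.startswith (c :: t) p.toList)
      · rw [if_pos h, if_pos]
        obtain ⟨p, hp, hs⟩ := List.any_eq_true.mp h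
        exact ⟨p, hp, ((PySem.Chars.startswith_iff _ _).mp hs).isInfix⟩
      · rw [if_neg h]
        by_cases h2 : ∃ p ∈ coreAminos, p.toList <:+: t
        · rw [if_pos h2, if_pos]
          obtain ⟨p, hp, hi⟩ := h2
          exact ⟨p, hp, List.infix_cons_iff.mpr (Or.inr hi)⟩
        · rw [if_neg h2, if_neg]
          rintro ⟨p, hp, hi⟩
          rcases List.infix_cons_iff.mp hi with hpre | hinf
          · exact h (List.any_eq_true.mpr ⟨p, hp, (PySem.Chars.startswith_iff _ _).mpr hpre⟩)
          · exact h2 ⟨p, hp, hinf⟩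

-- a listed amino matches the lowercased string iff a core pattern does
theorem full_iff_core (l : List Char) :
    (∃ a ∈ suspiciousAminos, a.toList <:+: PySem.Chars.lower l) ↔
    (∃ p ∈ coreAminos, p.toList <:+: PySem.Chars.lower l) := by
  constructor
  · rintro ⟨a, ha, hi⟩
    have hcov : suspiciousAminos.all (fun a => coreAminos.any
        (fun p => PySem.Chars.isIn p.toList a.toList) ||
        a.toList.any (fun c => PySem.Chars.isupper c)) = true := by decide
    have h := List.all_eq_true.mp hcov a ha
    rcases (Bool.or_eq_true _ _).mp h with hcore | hup
    · obtain ⟨p, hp, hin⟩ := List.any_eq_true.mp hcore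
      exact ⟨p, hp, ((PySem.Chars.isIn_iff_infix _ _).mp hin).trans hi⟩
    · obtain ⟨c, hc, hcu⟩ := List.any_eq_true.mp hup
      exact absurd (hi.subset hc) (upper_not_mem_lower c hcu l)
  · rintro ⟨p, hp, hi⟩
    have hmem : ∀ p ∈ coreAminos, p ∈ suspiciousAminos := by decide
    exact ⟨p, hmem p hp, hi⟩

theorem check_if_spiked_spec : Claim_equal_check_if_spiked := by
  intro s _
  unfold Spec_check_if_spiked check_if_spiked check_if_spiked_alt
  have hA : (PySem.Str.lower s).toList = PySem.Chars.lower s.toList := by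
    simp [PySem.Str.toList_lower]
  rw [spikeLoop_eq, spikeScan_eq, hA]
  by_cases h : ∃ a ∈ suspiciousAminos, a.toList <:+: PySem.Chars.lower s.toList
  · rw [if_pos h, if_pos ((full_iff_core s.toList).mp h)]
  · rw [if_neg h, if_neg (fun h2 => h ((full_iff_core s.toList).mpr h2))]
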